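-- pv_equiv track=rewrite | github.com/Marikalis/algorithms | house_distance.py | find_distances
-- ===== SOURCE A (Python) =====
-- from typing import List
--
-- def find_distances(houses, empty_house='0') -> List[int]:
--     number_of_houses = len(houses)
--     result = [0] * number_of_houses
--     zeros = [index for index, house in enumerate(houses) if house == empty_house]
--     first_zero = zeros[0]
--     for index in range(0, first_zero):
--         result[index] = (first_zero - index)
--     for previous, current in zip(zeros, zeros[1:]):
--         for index in range(previous + 1, current):
--             result[index] = min(
--                 index - previous,
--                 current - index
--             )
--     last_zero = zeros[-1]
--     for index in range(last_zero + 1, number_of_houses):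
--         result[index] = index - last_zero
--     return result
-- ===== SOURCE B (Python) =====
-- def find_distances(houses, empty_house='0'):
--     zeros = [i for i, h in enumerate(houses) if h == empty_house]
--     return [min(abs(i - z) for z in zeros) for i in range(len(houses))]
-- ===== Notes on version B (the rewrite author's own statement) =====
-- stated objective: simpler
-- what changed: Instead of A's three segment-filling write loops (before the first empty house, between consecutive empty houses, after the last), B computes each position's answer directly as the minimum absolute distance to any empty-house index, in one comprehension.
import Mathlib
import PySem

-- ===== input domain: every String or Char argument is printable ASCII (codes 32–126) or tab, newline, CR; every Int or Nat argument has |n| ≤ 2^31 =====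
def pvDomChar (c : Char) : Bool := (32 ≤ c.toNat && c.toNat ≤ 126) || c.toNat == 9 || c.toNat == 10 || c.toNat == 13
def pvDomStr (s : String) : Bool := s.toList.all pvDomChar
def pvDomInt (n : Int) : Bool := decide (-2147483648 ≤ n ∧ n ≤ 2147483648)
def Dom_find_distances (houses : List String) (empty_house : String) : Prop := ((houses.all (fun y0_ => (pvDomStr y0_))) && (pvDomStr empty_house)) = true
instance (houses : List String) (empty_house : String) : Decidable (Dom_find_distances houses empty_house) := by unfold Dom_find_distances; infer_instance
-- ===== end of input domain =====

-- B replaces A's three segment-filling write loops by a direct per-index minimum distance to any empty-house index (simpler, one comprehension); equivalence is proved on inputs containing at least one empty house (A raises IndexError otherwise).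

-- ===== PORT A =====
-- the zeros comprehension '[index for index, house in enumerate(houses) if house == empty_house]' (identical line in A and B)
def zerosOf (houses : List String) (empty_house : String) : List Int :=
  ((PySem.List.enumerate houses).filter (fun p => p.2 == empty_house)).map (fun p => p.1)

def find_distances (houses : List String) (empty_house : String) : List Int :=
  let number_of_houses : Int := (houses.length : Int)
  let result : List Int := List.replicate houses.length (0 : Int)
  let zeros : List Int := zerosOf houses empty_house
  match PySem.List.pyGet? zeros 0 with
  | none => []   -- zeros[0] raises IndexError here; excluded by Pre_
  | some first_zero =>
    let result := (PySem.List.pyRange 0 first_zero 1).foldl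
      (fun r index => PySem.List.pySetD r index (first_zero - index)) result
    let result := (zeros.zip (PySem.List.slice zeros (some 1) none)).foldl
      (fun r pc => (PySem.List.pyRange (pc.1 + 1) pc.2 1).foldl
        (fun r index => PySem.List.pySetD r index (min (index - pc.1) (pc.2 - index))) r) result
    let last_zero := PySem.List.pyGetD zeros (-1) 0
    (PySem.List.pyRange (last_zero + 1) number_of_houses 1).foldl
      (fun r index => PySem.List.pySetD r index (index - last_zero)) result

-- ===== PORT B =====
-- 'min(abs(i - z) for z in zeros)': Python's min folds min left over the sequence; empty sequence raises ValueError (the [] branch, excluded by Pre_)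
def bMinP (i : Int) (zeros : List Int) : Int :=
  match zeros.map (fun z => |i - z|) with
  | [] => 0
  | d :: ds => ds.foldl min d

def find_distances_alt (houses : List String) (empty_house : String) : List Int :=
  let zeros : List Int := zerosOf houses empty_house
  (PySem.List.pyRange 0 (houses.length : Int) 1).map (fun i => bMinP i zeros)

-- ===== PRECONDITION & SPEC =====
-- A raises IndexError (zeros[0]) exactly when no house equals empty_house; those inputs are excluded.
def Pre_find_distances (houses : List String) (empty_house : String) : Prop :=
  empty_house ∈ houses
instance (houses : List String) (empty_house : String) : Decidable (Pre_find_distances houses empty_house) := by unfold Pre_find_distances; infer_instance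

def pvWitness_find_distances : List String × String := (["1", "0", "1", "1"], "0")

def Spec_find_distances (houses : List String) (empty_house : String) (out : List Int) : Prop := out = find_distances_alt houses empty_house
instance (houses : List String) (empty_house : String) (out : List Int) : Decidable (Spec_find_distances houses empty_house out) := by unfold Spec_find_distances; infer_instance

-- ===== CLAIM (what is proved, stated in full; the proofs are below) =====
def Claim_equal_find_distances : Prop := ∀ (houses : List String) (empty_house : String), Dom_find_distances houses empty_house → Pre_find_distances houses empty_house → Spec_find_distances houses empty_house (find_distances houses empty_house)


-- ===== LEMMAS AND PROOFS =====

-- A's three phases applied to [0]*n, abstracted over the zeros list (zs = z0 :: …)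
def fillA (n : Nat) (zs : List Int) (z0 : Int) : List Int :=
  let r1 := (PySem.List.pyRange 0 z0 1).foldl
    (fun r index => PySem.List.pySetD r index (z0 - index)) (List.replicate n (0 : Int))
  let r2 := (zs.zip (PySem.List.slice zs (some 1) none)).foldl
    (fun r pc => (PySem.List.pyRange (pc.1 + 1) pc.2 1).foldl
      (fun r index => PySem.List.pySetD r index (min (index - pc.1) (pc.2 - index))) r) r1
  let last_zero := PySem.List.pyGetD zs (-1) 0
  (PySem.List.pyRange (last_zero + 1) (n : Int) 1).foldl
    (fun r index => PySem.List.pySetD r index (index - last_zero)) r2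

lemma A_eq_fillA (houses : List String) (empty_house : String) (z0 : Int) (t : List Int)
    (hz : zerosOf houses empty_house = z0 :: t) :
    find_distances houses empty_house = fillA houses.length (zerosOf houses empty_house) z0 := by
  simp only [find_distances, fillA, hz, PySem.List.pyGet?_zero_cons]

-- a fold of writes preserves length
lemma foldl_set_length (l : List Int) (f : Int → Int) (r : List Int) :
    (l.foldl (fun r i => PySem.List.pySetD r i (f i)) r).length = r.length := by
  induction l generalizing r with
  | nil => rfl
  | cons a t ih => simp only [List.foldl_cons]; rw [ih, PySem.List.length_pySetD]

-- a range-write loop leaves indices outside [a, b) unchanged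
lemma setR_ne (f : Int → Int) (a b : Int) (r : List Int) (ha : 0 ≤ a) (k : Nat)
    (h : ¬(a ≤ (k : Int) ∧ (k : Int) < b)) :
    ((PySem.List.pyRange a b 1).foldl (fun r i => PySem.List.pySetD r i (f i)) r)[k]? = r[k]? := by
  obtain ⟨n, hn⟩ : ∃ n : Nat, b - a ≤ n := ⟨(b - a).toNat, Int.self_le_toNat _⟩
  induction n generalizing a r with
  | zero => rw [PySem.List.pyRange_one_eq_nil (by omega)]; rfl
  | succ n ih =>
    by_cases hab : b ≤ a
    · rw [PySem.List.pyRange_one_eq_nil hab]; rfl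
    · replace hab : a < b := by omega
      rw [PySem.List.pyRange_one_cons hab, List.foldl_cons,
        ih (a + 1) (PySem.List.pySetD r a (f a)) (by omega) (by omega) (by omega),
        PySem.List.pySetD_of_nonneg r (f a) ha]
      exact List.getElem?_set_ne (by omega)

-- a range-write loop writes f k at each index in [a, b)
lemma setR_eq (f : Int → Int) (a b : Int) (r : List Int) (ha : 0 ≤ a) (k : Nat)
    (h1 : a ≤ (k : Int)) (h2 : (k : Int) < b) (hk : k < r.length) :
    ((PySem.List.pyRange a b 1).foldl (fun r i => PySem.List.pySetD r i (f i)) r)[k]? = some (f k) := by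
  obtain ⟨n, hn⟩ : ∃ n : Nat, b - a ≤ n := ⟨(b - a).toNat, Int.self_le_toNat _⟩
  induction n generalizing a r with
  | zero => omega
  | succ n ih =>
    have hab : a < b := by omega
    rw [PySem.List.pyRange_one_cons hab, List.foldl_cons]
    by_cases hak : a = (k : Int)
    · rw [setR_ne f (a + 1) b _ (by omega) k (by omega), PySem.List.pySetD_of_nonneg r (f a) ha]
      have hka : a.toNat = k := by omega
      rw [hka, List.getElem?_set_self (by omega), hak]
    · exact ih (a + 1) (PySem.List.pySetD r a (f a)) (by omega) (by omega)
        (by rw [PySem.List.length_pySetD]; exact hk) (by omega)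

-- the pair loop of phase 2 preserves length
lemma pairs_length (l : List (Int × Int)) (r : List Int) :
    (l.foldl (fun r pc => (PySem.List.pyRange (pc.1 + 1) pc.2 1).foldl
      (fun r index => PySem.List.pySetD r index (min (index - pc.1) (pc.2 - index))) r) r).length
    = r.length := by
  induction l generalizing r with
  | nil => rfl
  | cons pc l ih => simp only [List.foldl_cons]; rw [ih, foldl_set_length]

lemma head_le_of_sorted (z0 : Int) (t : List Int) (hs : (z0 :: t).Pairwise (· < ·))
    (z : Int) (hz : z ∈ z0 :: t) : z0 ≤ z := by
  rcases List.mem_cons.mp hz with h | h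
  · omega
  · have := (List.pairwise_cons.mp hs).1 z h; omega


-- phase 2 leaves k unchanged if k is strictly inside no pair
lemma pairsl_ne : ∀ (l : List (Int × Int)) (r : List Int) (k : Nat),
    (∀ pc ∈ l, 0 ≤ pc.1) → (∀ pc ∈ l, ¬(pc.1 < (k : Int) ∧ (k : Int) < pc.2)) →
    (l.foldl (fun r pc => (PySem.List.pyRange (pc.1 + 1) pc.2 1).foldl
      (fun r index => PySem.List.pySetD r index (min (index - pc.1) (pc.2 - index))) r) r)[k]?
    = r[k]? := by
  intro l
  induction l with
  | nil => intro r k _ _; rfl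
  | cons hd tl ih =>
    intro r k hnn h
    rw [List.foldl_cons, ih _ k (fun pc hpc => hnn pc (List.mem_cons_of_mem _ hpc))
      (fun pc hpc => h pc (List.mem_cons_of_mem _ hpc))]
    have h0 := h hd List.mem_cons_self
    exact setR_ne _ (hd.1 + 1) hd.2 r (by have := hnn hd List.mem_cons_self; omega) k (by omega)

-- phase 2 writes min(k - p, c - k) at k strictly inside the pair (p, c),
-- provided the pairs are chained left to right (x.2 ≤ y.1 pairwise)
lemma pairsl_eq : ∀ (l : List (Int × Int)), (∀ pc ∈ l, 0 ≤ pc.1) →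
    l.Pairwise (fun x y => x.2 ≤ y.1) →
    ∀ (r : List Int) (k : Nat), k < r.length → ∀ p c, (p, c) ∈ l →
    p < (k : Int) → (k : Int) < c →
    (l.foldl (fun r pc => (PySem.List.pyRange (pc.1 + 1) pc.2 1).foldl
      (fun r index => PySem.List.pySetD r index (min (index - pc.1) (pc.2 - index))) r) r)[k]?
    = some (min ((k : Int) - p) (c - (k : Int))) := by
  intro l
  induction l with
  | nil => intro _ _ r k _ p c hpc; simp at hpc
  | cons hd tl ih =>
    intro hnn hch r k hk p c hpc hp hc
    rw [List.foldl_cons]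
    rcases List.mem_cons.mp hpc with heq | htl
    · subst heq
      rw [pairsl_ne tl _ k (fun pc hpc => hnn pc (List.mem_cons_of_mem _ hpc)) ?_]
      · exact setR_eq _ (p + 1) c r
          (by have := hnn (p, c) List.mem_cons_self; simp at this; omega) k (by omega) hc hk
      · intro pc hpc' hcon
        have := (List.pairwise_cons.mp hch).1 pc hpc'
        simp at this; omega
    · exact ih (fun pc hpc => hnn pc (List.mem_cons_of_mem _ hpc))
        (List.pairwise_cons.mp hch).2 _ k (by rw [foldl_set_length]; exact hk) p c htl hp hc

-- consecutive pairs of a sorted list are chained left to right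
lemma zip_chain : ∀ (zs : List Int), zs.Pairwise (· < ·) →
    (zs.zip zs.tail).Pairwise (fun x y => x.2 ≤ y.1) := by
  intro zs
  induction zs with
  | nil => intro _; simp
  | cons z t ih =>
    intro hs
    cases t with
    | nil => simp
    | cons c t' =>
      simp only [List.tail_cons, List.zip_cons_cons]
      refine List.pairwise_cons.mpr ⟨?_, by
        have := ih (List.pairwise_cons.mp hs).2
        simpa using this⟩
      intro y hy
      have h1 : y.1 ∈ c :: t' := (List.of_mem_zip hy).1
      exact head_le_of_sorted c t' (List.pairwise_cons.mp hs).2 _ h1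

-- sortedness helpers
lemma le_getLast_of_sorted : ∀ (l : List Int) (h : l ≠ []), l.Pairwise (· < ·) →
    ∀ z ∈ l, z ≤ l.getLast h := by
  intro l
  induction l with
  | nil => intro h; simp at h
  | cons a t ih =>
    intro _ hs z hz
    cases t with
    | nil => simp at hz; simp [hz]
    | cons b t' =>
      rw [List.getLast_cons (by simp)]
      rcases List.mem_cons.mp hz with h | h
      · subst h
        have hmem := List.getLast_mem (l := b :: t') (by simp)
        have := (List.pairwise_cons.mp hs).1 _ hmem; omega
      · exact ih (by simp) (List.pairwise_cons.mp hs).2 z h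

lemma pair_between : ∀ (zs : List Int), zs.Pairwise (· < ·) →
    ∀ p c, (p, c) ∈ zs.zip zs.tail → ∀ z ∈ zs, z ≤ p ∨ c ≤ z := by
  intro zs
  induction zs with
  | nil => intro _ p c hpc; simp at hpc
  | cons z0 t ih =>
    intro hs p c hpc z hz
    cases t with
    | nil => simp at hpc
    | cons c0 t' =>
      simp only [List.tail_cons, List.zip_cons_cons] at hpc
      rcases List.mem_cons.mp hpc with heq | htl
      · obtain ⟨hpz, hcc⟩ : p = z0 ∧ c = c0 := by
          constructor <;> [exact (congrArg Prod.fst heq); exact (congrArg Prod.snd heq)]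
        subst hpz; subst hcc
        rcases List.mem_cons.mp hz with h | h
        · omega
        · right; exact head_le_of_sorted c t' (List.pairwise_cons.mp hs).2 z h
      · rcases List.mem_cons.mp hz with h | h
        · subst h
          left
          have h1 : p ∈ c0 :: t' := (List.of_mem_zip htl).1
          have := (List.pairwise_cons.mp hs).1 p h1; omega
        · exact ih (List.pairwise_cons.mp hs).2 p c htl z h

lemma exists_pair : ∀ (t : List Int) (z0 : Int), (z0 :: t).Pairwise (· < ·) →
    ∀ i : Int, z0 < i → i < (z0 :: t).getLast (by simp) → i ∉ z0 :: t →
    ∃ p c, (p, c) ∈ (z0 :: t).zip t ∧ p < i ∧ i < c := by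
  intro t
  induction t with
  | nil => intro z0 _ i h1 h2; simp at h2; omega
  | cons c0 t' ih =>
    intro z0 hs i h1 h2 h3
    by_cases hlt : i < c0
    · exact ⟨z0, c0, by simp, h1, hlt⟩
    · replace hlt : c0 ≤ i := by omega
      have hne : i ≠ c0 := fun h => h3 (by simp [h])
      have hc0 : c0 < i := by omega
      rw [List.getLast_cons (by simp)] at h2
      obtain ⟨p, c, hpc, hp, hc⟩ := ih c0 (List.pairwise_cons.mp hs).2 i hc0 h2
        (fun h => h3 (List.mem_cons_of_mem _ h))
      exact ⟨p, c, List.mem_cons_of_mem _ hpc, hp, hc⟩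

-- bMinP characterisation
lemma bMinP_le (i : Int) (zs : List Int) (z : Int) (hz : z ∈ zs) : bMinP i zs ≤ |i - z| := by
  cases zs with
  | nil => simp at hz
  | cons z0 t =>
    show ((z0 :: t).map (fun z => |i - z|)).tail.foldl min (|i - z0|) ≤ _
    rcases List.mem_cons.mp hz with h | h
    · subst h; exact (PySem.List.foldl_min_le _ _).1
    · exact (PySem.List.foldl_min_le _ _).2 _ (List.mem_map_of_mem h)

lemma bMinP_mem (i z0 : Int) (t : List Int) : ∃ z ∈ z0 :: t, bMinP i (z0 :: t) = |i - z| := by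
  rcases PySem.List.foldl_min_mem (t.map (fun z => |i - z|)) (|i - z0|) with h | h
  · exact ⟨z0, List.mem_cons_self, h⟩
  · obtain ⟨z, hz, hv⟩ := List.mem_map.mp h
    exact ⟨z, List.mem_cons_of_mem _ hz, hv.symm⟩

lemma bMinP_eq (i z0 : Int) (t : List Int) (v : Int)
    (hc : ∃ z ∈ z0 :: t, |i - z| = v) (hlb : ∀ z ∈ z0 :: t, v ≤ |i - z|) :
    bMinP i (z0 :: t) = v := by
  obtain ⟨z, hz, hv⟩ := hc
  obtain ⟨z', hz', hv'⟩ := bMinP_mem i z0 t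
  have h1 : bMinP i (z0 :: t) ≤ v := hv ▸ bMinP_le i _ z hz
  have h2 : v ≤ bMinP i (z0 :: t) := hv' ▸ hlb z' hz'
  omega

-- the key pointwise lemma: A's filled array holds the minimum distance at every index
lemma fillA_getElem (n : Nat) (z0 : Int) (t : List Int) (hs : (z0 :: t).Pairwise (· < ·))
    (hb : ∀ z ∈ z0 :: t, 0 ≤ z ∧ z < (n : Int)) (k : Nat) (hk : k < n) :
    (fillA n (z0 :: t) z0)[k]? = some (bMinP (k : Int) (z0 :: t)) := by
  have hne : (z0 :: t) ≠ [] := by simp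
  have hz0b := hb z0 List.mem_cons_self
  have hLmem : (z0 :: t).getLast hne ∈ z0 :: t := List.getLast_mem hne
  have hLb := hb _ hLmem
  have hz0L : z0 ≤ (z0 :: t).getLast hne := le_getLast_of_sorted _ hne hs z0 List.mem_cons_self
  have hnn : ∀ z ∈ z0 :: t, 0 ≤ z := fun z hz => (hb z hz).1
  unfold fillA
  rw [PySem.List.slice_from_one, PySem.List.pyGetD_neg_one _ _ hne]
  have hr1len : ((PySem.List.pyRange 0 z0 1).foldl
      (fun r index => PySem.List.pySetD r index (z0 - index))
      (List.replicate n (0 : Int))).length = n := by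
    rw [foldl_set_length, List.length_replicate]
  by_cases hc1 : (k : Int) < z0
  · -- before the first zero: phase 1 wrote z0 - k, phases 2 and 3 do not touch k
    rw [setR_ne _ ((z0 :: t).getLast hne + 1) _ _ (by omega) k (by omega),
      pairsl_ne ((z0 :: t).zip (z0 :: t).tail) _ k (fun pc hpc => (hb _ (List.of_mem_zip hpc).1).1) ?_,
      setR_eq _ 0 z0 _ (by omega) k (by omega) hc1 (by simpa using hk),
      bMinP_eq (k : Int) z0 t (z0 - k) ⟨z0, List.mem_cons_self, by
        rw [abs_of_nonpos (by omega)]; ring⟩ ?_]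
    · intro z hz
      have := head_le_of_sorted z0 t hs z hz
      rw [abs_of_nonpos (by omega)]; omega
    · intro pc hpc
      have h1 : pc.1 ∈ z0 :: t := (List.of_mem_zip hpc).1
      have := head_le_of_sorted z0 t hs _ h1
      omega
  · by_cases hc2 : (z0 :: t).getLast hne < (k : Int)
    · -- after the last zero: phase 3 wrote k - last
      rw [setR_eq _ ((z0 :: t).getLast hne + 1) _ _ (by omega) k (by omega) (by omega)
        (by rw [pairs_length, hr1len]; exact hk),
        bMinP_eq (k : Int) z0 t ((k : Int) - (z0 :: t).getLast hne)
          ⟨(z0 :: t).getLast hne, hLmem, abs_of_nonneg (by omega)⟩ ?_]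
      intro z hz
      have := le_getLast_of_sorted _ hne hs z hz
      rw [abs_of_nonneg (by omega)]; omega
    · -- z0 ≤ k ≤ last
      rw [setR_ne _ ((z0 :: t).getLast hne + 1) _ _ (by omega) k (by omega)]
      by_cases hmem : (k : Int) ∈ z0 :: t
      · -- k is itself a zero: nothing ever writes it, the initial 0 survives
        rw [pairsl_ne ((z0 :: t).zip (z0 :: t).tail) _ k (fun pc hpc => (hb _ (List.of_mem_zip hpc).1).1) ?_, setR_ne _ 0 z0 _ (by omega) k (by omega),
          List.getElem?_replicate, if_pos hk,
          bMinP_eq (k : Int) z0 t 0 ⟨(k : Int), hmem, by simp⟩ (fun z _ => abs_nonneg _)]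
        intro pc hpc
        rcases pair_between (z0 :: t) hs pc.1 pc.2 hpc _ hmem with h | h <;>
          omega
      · -- k lies strictly between two consecutive zeros p < k < c
        have hkL : (k : Int) < (z0 :: t).getLast hne := by
          rcases lt_or_eq_of_le (le_of_not_gt hc2) with h | h
          · exact h
          · exact absurd (h ▸ hLmem) hmem
        have hz0k : z0 < (k : Int) := by
          rcases lt_or_eq_of_le (le_of_not_gt hc1) with h | h
          · exact h
          · exact absurd (h ▸ List.mem_cons_self) hmem
        obtain ⟨p, c, hpc, hp, hc⟩ := exists_pair t z0 hs (k : Int) hz0k hkL hmem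
        rw [pairsl_eq ((z0 :: t).zip (z0 :: t).tail)
            (fun pc hpc => (hb _ (List.of_mem_zip hpc).1).1) (zip_chain _ hs) _ k
            (by rw [hr1len]; exact hk) p c (by simpa using hpc) hp hc,
          bMinP_eq (k : Int) z0 t (min ((k : Int) - p) (c - (k : Int))) ?_ ?_]
        · by_cases hside : (k : Int) - p ≤ c - (k : Int)
          · exact ⟨p, (List.of_mem_zip hpc).1, by
              rw [abs_of_nonneg (by omega), min_eq_left hside]⟩
          · exact ⟨c, List.mem_cons_of_mem _ (List.of_mem_zip hpc).2, by
              rw [abs_of_nonpos (by omega), min_eq_right (by omega)]; ring⟩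
        · intro z hz
          rcases pair_between (z0 :: t) hs p c (by simpa using hpc) z hz with h | h
          · rw [abs_of_nonneg (by omega)]; omega
          · rw [abs_of_nonpos (by omega)]; omega

lemma fillA_length (n : Nat) (zs : List Int) (z0 : Int) : (fillA n zs z0).length = n := by
  unfold fillA
  rw [foldl_set_length, pairs_length, foldl_set_length, List.length_replicate]

-- facts about the zeros list
lemma zerosOf_sorted (houses : List String) (e : String) : (zerosOf houses e).Pairwise (· < ·) := by
  unfold zerosOf
  exact List.Pairwise.map _ (fun a b hab => hab)
    ((PySem.List.pairwise_lt_enumerate houses 0).filter (fun p => p.2 == e))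

lemma zerosOf_bounds (houses : List String) (e : String) :
    ∀ z ∈ zerosOf houses e, 0 ≤ z ∧ z < (houses.length : Int) := by
  intro z hz
  unfold zerosOf at hz
  obtain ⟨p, hp, hz⟩ := List.mem_map.mp hz
  obtain ⟨k, hklt, hk⟩ := (PySem.List.mem_enumerate_iff _ _ _).mp (List.mem_of_mem_filter hp)
  subst hz; rw [hk]; simp; omega

lemma zerosOf_ne_nil (houses : List String) (e : String) (h : e ∈ houses) :
    zerosOf houses e ≠ [] := by
  obtain ⟨k, hk, he⟩ := List.getElem_of_mem h
  have hmem : ((k : Int), e) ∈ PySem.List.enumerate houses :=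
    (PySem.List.mem_enumerate_iff _ _ _).mpr ⟨k, hk, by simp [he]⟩
  intro hnil
  unfold zerosOf at hnil
  rw [List.map_eq_nil_iff, List.filter_eq_nil_iff] at hnil
  exact hnil _ hmem (by simp)

-- ===== VERDICT (by name: the statement is the Claim_ definition above) =====
theorem find_distances_spec : Claim_equal_find_distances := by
  intro houses e hdom hpre
  unfold Spec_find_distances
  have hnil := zerosOf_ne_nil houses e hpre
  obtain ⟨z0, t, hz⟩ := List.exists_cons_of_ne_nil hnil
  have hs := zerosOf_sorted houses e
  have hb := zerosOf_bounds houses e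
  rw [hz] at hs hb
  rw [A_eq_fillA houses e z0 t hz]
  show fillA houses.length (zerosOf houses e) z0
      = (PySem.List.pyRange 0 (houses.length : Int) 1).map (fun i => bMinP i (zerosOf houses e))
  rw [hz]
  apply List.ext_getElem?
  intro k
  by_cases hk : k < houses.length
  · rw [fillA_getElem houses.length z0 t hs hb k hk,
      PySem.List.getElem?_map_pyRange_zero _ houses.length k hk]
  · rw [List.getElem?_eq_none (by rw [fillA_length]; omega),
      List.getElem?_eq_none
        (by rw [List.length_map, PySem.List.length_pyRange_one]; simp; omega)]
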